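-- pv_equiv track=rewrite | github.com/Faith-lyle/H18-1 | Golden Finger Test-3.5.py | mic_test
-- ===== SOURCE A (Python) =====
-- def mic_test(result):
--     if len(result) != 64:
--         return False
--     m = 8
--     value = 0
--     for a in range(7):
--         ok1 = result[m - 8:m]
--         ok2 = result[m:m + 8]
--         if ok1 == ok2:
--             value += 1
--         else:
--             value += 0
--         m += 8
--     if value >= 7:
--         final = False
--     else:
--         final = True
--     return final
-- ===== SOURCE B (Python) =====
-- def mic_test(result):
--     # True iff the 64-sample capture is NOT 8-periodic: shifting by one
--     # 8-element block must reproduce the sequence for a pass (False).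
--     return len(result) == 64 and result[:56] != result[8:]
-- ===== Notes on version B (the rewrite author's own statement) =====
-- stated objective: simpler
-- what changed: A compares each of the seven adjacent 8-element block pairs with a counter and a >=7 threshold; B does a single shift-by-one-block comparison, returning len(result) == 64 and result[:56] != result[8:].
import Mathlib
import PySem

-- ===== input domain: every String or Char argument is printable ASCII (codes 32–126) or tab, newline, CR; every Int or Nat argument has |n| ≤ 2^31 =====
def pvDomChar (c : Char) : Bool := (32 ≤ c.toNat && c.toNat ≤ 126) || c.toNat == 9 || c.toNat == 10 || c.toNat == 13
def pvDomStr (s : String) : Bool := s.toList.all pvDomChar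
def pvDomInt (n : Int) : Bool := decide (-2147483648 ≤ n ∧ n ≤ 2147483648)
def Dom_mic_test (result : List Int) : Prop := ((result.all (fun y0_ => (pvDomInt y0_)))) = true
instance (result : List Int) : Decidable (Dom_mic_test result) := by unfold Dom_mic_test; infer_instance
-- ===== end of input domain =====

-- B replaces A's block-by-block compare-and-count loop by a single shift-by-one-block slice comparison (simpler).

-- ===== PORT A =====
def mic_test (result : List Int) : Bool :=
  if result.length ≠ 64 then false
  else
    let st := (PySem.List.pyRange 0 7 1).foldl
      (fun (s : Int × Int) _ =>
        let ok1 := PySem.List.slice result (some (s.1 - 8)) (some s.1)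
        let ok2 := PySem.List.slice result (some s.1) (some (s.1 + 8))
        let value := if ok1 == ok2 then s.2 + 1 else s.2 + 0
        (s.1 + 8, value)) ((8 : Int), (0 : Int))
    if st.2 ≥ 7 then false else true

-- ===== PORT B =====
def mic_test_alt (result : List Int) : Bool :=
  decide (result.length = 64) &&
    !(PySem.List.slice result none (some 56) == PySem.List.slice result (some 8) none)

-- ===== PRECONDITION & SPEC =====
def Spec_mic_test (result : List Int) (out : Bool) : Prop := out = mic_test_alt result
instance (result : List Int) (out : Bool) : Decidable (Spec_mic_test result out) := by unfold Spec_mic_test; infer_instance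

-- ===== CLAIM (what is proved, stated in full; the proofs are below) =====
def Claim_equal_mic_test : Prop := ∀ (result : List Int), Dom_mic_test result → Spec_mic_test result (mic_test result)

-- ===== LEMMAS AND PROOFS =====

-- equality of length-8 blocks at offsets a and a+8, expressed elementwise
theorem mic_blockIff (l : List Int) (a : ℕ) :
    (List.take 8 (List.drop a l) = List.take 8 (List.drop (a+8) l)) ↔
      ∀ j < 8, l[a+j]? = l[a+8+j]? := by
  constructor
  · intro he j hj
    have h1 : (List.take 8 (List.drop a l))[j]? = (List.take 8 (List.drop (a+8) l))[j]? := by rw [he]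
    simpa [List.getElem?_take, hj, List.getElem?_drop] using h1
  · intro H
    apply List.ext_getElem?
    intro n
    by_cases hn : n < 8
    · simpa [List.getElem?_take, hn, List.getElem?_drop] using H n hn
    · simp [hn]

-- the shift-by-8 comparison of B, expressed elementwise
theorem mic_shiftIff (l : List Int) (h : l.length = 64) :
    (List.take 56 l = List.drop 8 l) ↔ ∀ n < 56, l[n]? = l[n+8]? := by
  constructor
  · intro he n hn
    have h1 : (List.take 56 l)[n]? = (List.drop 8 l)[n]? := by rw [he]
    simpa [List.getElem?_take, hn, List.getElem?_drop, Nat.add_comm] using h1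
  · intro H
    apply List.ext_getElem?
    intro n
    by_cases hn : n < 56
    · simpa [List.getElem?_take, hn, List.getElem?_drop, Nat.add_comm] using H n hn
    · have : l[8+n]? = none := by rw [List.getElem?_eq_none]; omega
      simp [hn, List.getElem?_drop, this]

-- B's one comparison ↔ A's seven adjacent-block comparisons
theorem mic_main_iff (l : List Int) (h : l.length = 64) :
    (List.take 56 l = List.drop 8 l) ↔
      (List.take 8 l = List.take 8 (List.drop 8 l) ∧
       List.take 8 (List.drop 8 l) = List.take 8 (List.drop 16 l) ∧
       List.take 8 (List.drop 16 l) = List.take 8 (List.drop 24 l) ∧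
       List.take 8 (List.drop 24 l) = List.take 8 (List.drop 32 l) ∧
       List.take 8 (List.drop 32 l) = List.take 8 (List.drop 40 l) ∧
       List.take 8 (List.drop 40 l) = List.take 8 (List.drop 48 l) ∧
       List.take 8 (List.drop 48 l) = List.take 8 (List.drop 56 l)) := by
  rw [mic_shiftIff l h]
  have e0 := mic_blockIff l 0
  have e1 := mic_blockIff l 8
  have e2 := mic_blockIff l 16
  have e3 := mic_blockIff l 24
  have e4 := mic_blockIff l 32
  have e5 := mic_blockIff l 40
  have e6 := mic_blockIff l 48
  norm_num at e0 e1 e2 e3 e4 e5 e6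
  rw [e0, e1, e2, e3, e4, e5, e6]
  constructor
  · intro H
    refine ⟨?_, ?_, ?_, ?_, ?_, ?_, ?_⟩
    · intro j hj; have := H j (by omega); simpa [Nat.add_comm] using this
    · intro j hj; have := H (8+j) (by omega)
      rw [show 8+j+8 = 16+j by omega] at this; simpa using this
    · intro j hj; have := H (16+j) (by omega)
      rw [show 16+j+8 = 24+j by omega] at this; simpa using this
    · intro j hj; have := H (24+j) (by omega)
      rw [show 24+j+8 = 32+j by omega] at this; simpa using this
    · intro j hj; have := H (32+j) (by omega)
      rw [show 32+j+8 = 40+j by omega] at this; simpa using this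
    · intro j hj; have := H (40+j) (by omega)
      rw [show 40+j+8 = 48+j by omega] at this; simpa using this
    · intro j hj; have := H (48+j) (by omega)
      rw [show 48+j+8 = 56+j by omega] at this; simpa using this
  · rintro ⟨c0, c1, c2, c3, c4, c5, c6⟩ n hn
    rcases Nat.lt_or_ge n 8 with h' | h'
    · have := c0 n h'; simpa [Nat.add_comm] using this
    rcases Nat.lt_or_ge n 16 with h'' | h''
    · have := c1 (n-8) (by omega); rwa [show 8+(n-8) = n by omega, show 16+(n-8) = n+8 by omega] at this
    rcases Nat.lt_or_ge n 24 with h3 | h3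
    · have := c2 (n-16) (by omega); rwa [show 16+(n-16) = n by omega, show 24+(n-16) = n+8 by omega] at this
    rcases Nat.lt_or_ge n 32 with h4 | h4
    · have := c3 (n-24) (by omega); rwa [show 24+(n-24) = n by omega, show 32+(n-24) = n+8 by omega] at this
    rcases Nat.lt_or_ge n 40 with h5 | h5
    · have := c4 (n-32) (by omega); rwa [show 32+(n-32) = n by omega, show 40+(n-32) = n+8 by omega] at this
    rcases Nat.lt_or_ge n 48 with h6 | h6
    · have := c5 (n-40) (by omega); rwa [show 40+(n-40) = n by omega, show 48+(n-40) = n+8 by omega] at this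
    · have := c6 (n-48) (by omega); rwa [show 48+(n-48) = n by omega, show 56+(n-48) = n+8 by omega] at this

theorem mic_main (l : List Int) : mic_test l = mic_test_alt l := by
  by_cases h : l.length = 64
  · unfold mic_test mic_test_alt
    have hr : PySem.List.pyRange 0 7 1 = [0,1,2,3,4,5,6] := by decide
    rw [hr, PySem.List.slice_to l (by decide), PySem.List.slice_from l (by decide)]
    simp only [h, List.foldl, ne_eq, decide_true, Bool.true_and]
    norm_num [PySem.List.slice_toNat l]
    simp
    by_cases h0 : List.take 8 l = List.take 8 (List.drop 8 l) <;>
    by_cases h1 : List.take 8 (List.drop 8 l) = List.take 8 (List.drop 16 l) <;>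
    by_cases h2 : List.take 8 (List.drop 16 l) = List.take 8 (List.drop 24 l) <;>
    by_cases h3 : List.take 8 (List.drop 24 l) = List.take 8 (List.drop 32 l) <;>
    by_cases h4 : List.take 8 (List.drop 32 l) = List.take 8 (List.drop 40 l) <;>
    by_cases h5 : List.take 8 (List.drop 40 l) = List.take 8 (List.drop 48 l) <;>
    by_cases h6 : List.take 8 (List.drop 48 l) = List.take 8 (List.drop 56 l) <;>
    simp_all [mic_main_iff l h]
  · simp [mic_test, mic_test_alt, h]

-- ===== VERDICT (by name: the statement is the Claim_ definition above) =====
theorem mic_test_spec : Claim_equal_mic_test := by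
  intro result _
  exact mic_main result
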